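-- pv_equiv track=rewrite | github.com/krispypatata/shenanigans | FindNSticksNTriangles.py | findNSticksNTriangles
-- ===== SOURCE A (Python) =====
-- def findNSticksNTriangles(n):
--     returnValues = [0, 0]
--
--     nTriangles = n*n
--     returnValues[1] = nTriangles
--
--     nSticks = 0
--     for i in range(n+1):
--         nSticks += i
--     nSticks *= 3
--     returnValues[0] = nSticks
--
--     return returnValues
-- ===== SOURCE B (Python) =====
-- def findNSticksNTriangles(n):
--     m = n if n > 0 else 0
--     return [3 * m * (m + 1) // 2, n * n]
-- ===== Notes on version B (the rewrite author's own statement) =====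
-- stated objective: faster
-- what changed: replaces the O(n) summation loop over range(n+1) with the closed form 3*m*(m+1)//2 (m = max(n,0))
import Mathlib
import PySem

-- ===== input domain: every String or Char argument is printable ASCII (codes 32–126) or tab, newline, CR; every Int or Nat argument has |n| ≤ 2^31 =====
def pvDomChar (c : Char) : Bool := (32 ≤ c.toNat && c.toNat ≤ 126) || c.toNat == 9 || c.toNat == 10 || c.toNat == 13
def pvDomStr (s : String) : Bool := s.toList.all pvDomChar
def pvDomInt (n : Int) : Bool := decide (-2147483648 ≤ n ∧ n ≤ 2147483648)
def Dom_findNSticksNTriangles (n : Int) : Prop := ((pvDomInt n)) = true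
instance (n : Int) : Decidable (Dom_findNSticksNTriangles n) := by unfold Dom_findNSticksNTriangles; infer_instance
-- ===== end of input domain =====

-- B replaces A's O(n) summation loop with the O(1) closed form 3*m*(m+1)//2, m = max(n,0).

-- ===== PORT A =====
def findNSticksNTriangles (n : Int) : List Int :=
  let nTriangles := n * n
  let nSticks0 := (PySem.List.pyRange 0 (n + 1) 1).foldl (fun acc i => acc + i) 0
  let nSticks := nSticks0 * 3
  [nSticks, nTriangles]

-- ===== PORT B =====
def findNSticksNTriangles_alt (n : Int) : List Int :=
  let m := if n > 0 then n else 0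
  [PySem.Int.floordiv (3 * m * (m + 1)) 2, n * n]

-- ===== PRECONDITION & SPEC =====
def Spec_findNSticksNTriangles (n : Int) (out : List Int) : Prop := out = findNSticksNTriangles_alt n
instance (n : Int) (out : List Int) : Decidable (Spec_findNSticksNTriangles n out) := by unfold Spec_findNSticksNTriangles; infer_instance

-- ===== CLAIM (what is proved, stated in full; the proofs are below) =====
def Claim_equal_findNSticksNTriangles : Prop := ∀ (n : Int), Dom_findNSticksNTriangles n → Spec_findNSticksNTriangles n (findNSticksNTriangles n)

-- ===== LEMMAS AND PROOFS =====

-- twice the sum of range(0, b) equals b*(b-1)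
theorem pv_sum_pyRange (b : Int) (hb : 0 ≤ b) :
    2 * (PySem.List.pyRange 0 b 1).foldl (fun acc i => acc + i) 0 = b * (b - 1) := by
  induction b, hb using Int.le_induction with
  | base => rw [PySem.List.pyRange_one_eq_nil le_rfl]; simp
  | succ b hb ih =>
    rw [PySem.List.pyRange_one_succ_right hb, List.foldl_append]
    simp only [List.foldl]
    nlinarith [ih]

theorem findNSticksNTriangles_eq (n : Int) :
    findNSticksNTriangles n = findNSticksNTriangles_alt n := by
  rcases eq_or_ne n 0 with h0 | h0
  · subst h0; decide
  unfold findNSticksNTriangles findNSticksNTriangles_alt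
  by_cases hn : 0 < n
  · have hS := pv_sum_pyRange (n + 1) (by omega)
    simp only [if_pos hn]
    rw [PySem.Int.floordiv_eq_ediv_of_pos (by norm_num)]
    set S := (PySem.List.pyRange 0 (n + 1) 1).foldl (fun acc i => acc + i) 0 with hSdef
    have h6 : 3 * n * (n + 1) = 2 * (S * 3) := by nlinarith
    rw [h6, Int.mul_ediv_cancel_left _ (by norm_num)]
  · have h : n + 1 ≤ 0 := by omega
    rw [PySem.List.pyRange_one_eq_nil h]
    simp [if_neg hn, PySem.Int.floordiv]

-- ===== VERDICT (by name: the statement is the Claim_ definition above) =====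
theorem findNSticksNTriangles_spec : Claim_equal_findNSticksNTriangles := by
  intro n _
  exact findNSticksNTriangles_eq n
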